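-- pv_equiv track=rewrite | github.com/YangZhangMizzou/Waterfowl_detector_pipeline | retinanet_inference_ver3.py | get_model_extension
-- ===== SOURCE A (Python) =====
-- model_extension = {
--         'Bird_drone':{40:('_alt_30',30),
--                         75:('_alt_60',60),
--                         90:('_alt_90',90)},
--         'Bird_drone_KNN':{20:('_alt_15',15),
--                         40:('_alt_30',30),
--                         75:('_alt_60',60),
--                         90:('_alt_90',90)}
--                     }
--
-- def get_model_extension(model_type,model_dir,altitude):
--     if(model_type in model_extension):
--         model_ext = model_extension[model_type]
--         for altitude_thresh in model_ext:
--             if (altitude_thresh>=altitude):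
--                 ref_altitude = model_ext[altitude_thresh][1]
--                 model_dir = model_dir.replace('.pkl',model_ext[altitude_thresh][0]+'.pkl')
--                 return model_dir,ref_altitude
--         model_dir = model_dir.replace('.pkl',model_ext[max(model_ext.keys())][0]+'.pkl')
--         return model_dir,model_ext[max(model_ext.keys())][1]
--     else:
--         return model_dir,altitude
-- ===== SOURCE B (Python) =====
-- model_extension = {
--         'Bird_drone':{40:('_alt_30',30),
--                         75:('_alt_60',60),
--                         90:('_alt_90',90)},
--         'Bird_drone_KNN':{20:('_alt_15',15),
--                         40:('_alt_30',30),
--                         75:('_alt_60',60),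
--                         90:('_alt_90',90)}
--                     }
--
-- def get_model_extension(model_type, model_dir, altitude):
--     if model_type not in model_extension:
--         return model_dir, altitude
--     model_ext = model_extension[model_type]
--     candidates = [t for t in model_ext if t >= altitude]
--     chosen = min(candidates) if candidates else max(model_ext)
--     suffix, ref = model_ext[chosen]
--     return model_dir.replace('.pkl', suffix + '.pkl'), ref
-- ===== Notes on version B (the rewrite author's own statement) =====
-- stated objective: simpler
-- what changed: Replaces the first-match early-return iteration over dict keys (with a duplicated max-key fallback branch) by a single select step: filter the eligible thresholds, choose min of them or max of all keys, then one shared return expression.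
import Mathlib
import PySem

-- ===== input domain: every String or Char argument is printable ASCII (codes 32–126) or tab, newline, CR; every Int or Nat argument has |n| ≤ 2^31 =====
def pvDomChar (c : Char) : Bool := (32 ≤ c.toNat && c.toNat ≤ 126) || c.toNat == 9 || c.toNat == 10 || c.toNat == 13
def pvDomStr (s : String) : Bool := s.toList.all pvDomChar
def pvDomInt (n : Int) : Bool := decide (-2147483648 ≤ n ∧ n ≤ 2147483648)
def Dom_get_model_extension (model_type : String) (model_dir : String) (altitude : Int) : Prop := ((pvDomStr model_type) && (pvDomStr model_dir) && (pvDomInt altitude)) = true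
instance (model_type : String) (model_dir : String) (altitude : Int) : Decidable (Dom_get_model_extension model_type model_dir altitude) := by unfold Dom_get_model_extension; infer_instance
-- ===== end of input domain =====

-- B replaces A's first-match early-return loop (plus a separate max-key fallback branch) by
-- filter-then-select (min of eligible thresholds, else max of all keys) with one shared return; objective: simpler.

-- module-level constant model_extension, shared by both Pythons (assoc list, insertion order)
def pvModelExtension : List (String × List (Int × String × Int)) :=
  [("Bird_drone", [(40, "_alt_30", 30), (75, "_alt_60", 60), (90, "_alt_90", 90)]),
   ("Bird_drone_KNN", [(20, "_alt_15", 15), (40, "_alt_30", 30), (75, "_alt_60", 60), (90, "_alt_90", 90)])]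

-- ===== PORT A =====
-- model_ext[k] for a key known to be present (direct dict indexing in the Python)
def pvExtGet (ext : List (Int × String × Int)) (k : Int) : String × Int :=
  match ext with
  | [] => ("", 0)
  | (t, suf, ref) :: rest => if t == k then (suf, ref) else pvExtGet rest k

-- A's for-loop over the dict keys with early return (none = loop fell through)
def pvLoopA (orig ext : List (Int × String × Int)) (model_dir : String) (altitude : Int) : Option (String × Int) :=
  match ext with
  | [] => none
  | (t, _, _) :: rest =>
    if t ≥ altitude then
      some (PySem.Str.replace model_dir ".pkl" ((pvExtGet orig t).1 ++ ".pkl"), (pvExtGet orig t).2)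
    else pvLoopA orig rest model_dir altitude

def get_model_extension (model_type : String) (model_dir : String) (altitude : Int) : String × Int :=
  match (PySem.Dict.mk pvModelExtension).get? model_type with
  | some ext =>
    match pvLoopA ext ext model_dir altitude with
    | some r => r
    | none =>
      let mx := (PySem.List.max? (ext.map (·.1)) (fun x => x)).getD 0
      (PySem.Str.replace model_dir ".pkl" ((pvExtGet ext mx).1 ++ ".pkl"), (pvExtGet ext mx).2)
  | none => (model_dir, altitude)

-- ===== PORT B =====
def get_model_extension_alt (model_type : String) (model_dir : String) (altitude : Int) : String × Int :=
  match (PySem.Dict.mk pvModelExtension).get? model_type with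
  | none => (model_dir, altitude)
  | some ext =>
    let keys := ext.map (·.1)
    let candidates := keys.filter (fun t => t ≥ altitude)
    let chosen := if candidates ≠ [] then (PySem.List.min? candidates (fun x => x)).getD 0
                  else (PySem.List.max? keys (fun x => x)).getD 0
    let e := pvExtGet ext chosen
    (PySem.Str.replace model_dir ".pkl" (e.1 ++ ".pkl"), e.2)

-- ===== PRECONDITION & SPEC =====
def Spec_get_model_extension (model_type : String) (model_dir : String) (altitude : Int) (out : String × Int) : Prop := out = get_model_extension_alt model_type model_dir altitude
instance (model_type : String) (model_dir : String) (altitude : Int) (out : String × Int) : Decidable (Spec_get_model_extension model_type model_dir altitude out) := by unfold Spec_get_model_extension; infer_instance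

-- ===== CLAIM (what is proved, stated in full; the proofs are below) =====
def Claim_equal_get_model_extension : Prop := ∀ (model_type : String) (model_dir : String) (altitude : Int), Dom_get_model_extension model_type model_dir altitude → Spec_get_model_extension model_type model_dir altitude (get_model_extension model_type model_dir altitude)

-- ===== LEMMAS AND PROOFS =====

-- A's loop+fallback equals B's filter-then-select, for one concrete threshold table
theorem pvBranchLem (ext : List (Int × String × Int))
    (h : ext = [((40:Int), "_alt_30", (30:Int)), (75, "_alt_60", 60), (90, "_alt_90", 90)] ∨
         ext = [((20:Int), "_alt_15", (15:Int)), (40, "_alt_30", 30), (75, "_alt_60", 60), (90, "_alt_90", 90)])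
    (md : String) (alt : Int) :
    (match pvLoopA ext ext md alt with
     | some r => r
     | none =>
       let mx := (PySem.List.max? (ext.map (·.1)) (fun x => x)).getD 0
       (PySem.Str.replace md ".pkl" ((pvExtGet ext mx).1 ++ ".pkl"), (pvExtGet ext mx).2))
    = (let keys := ext.map (·.1)
       let candidates := keys.filter (fun t => t ≥ alt)
       let chosen := if candidates ≠ [] then (PySem.List.min? candidates (fun x => x)).getD 0
                     else (PySem.List.max? keys (fun x => x)).getD 0
       let e := pvExtGet ext chosen
       (PySem.Str.replace md ".pkl" (e.1 ++ ".pkl"), e.2)) := by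
  rcases h with h | h <;> subst h <;>
    by_cases h20 : (20:Int) ≥ alt <;> by_cases h40 : (40:Int) ≥ alt <;>
    by_cases h75 : (75:Int) ≥ alt <;> by_cases h90 : (90:Int) ≥ alt <;>
    simp [pvLoopA, pvExtGet, PySem.List.min?, PySem.List.max?, List.filter, h20, h40, h75, h90]

-- ===== VERDICT (by name: the statement is the Claim_ definition above) =====
set_option maxHeartbeats 1600000 in
theorem get_model_extension_spec : Claim_equal_get_model_extension := by
  intro model_type model_dir altitude _
  unfold Spec_get_model_extension get_model_extension get_model_extension_alt
  by_cases h1 : ("Bird_drone" == model_type) = true <;>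
  by_cases h2 : ("Bird_drone_KNN" == model_type) = true
  · exact absurd (eq_of_beq h1 ▸ eq_of_beq h2) (by decide)
  · simp only [pvModelExtension, PySem.Dict.get?_mk_cons, h1, if_pos]
    exact pvBranchLem _ (Or.inl rfl) model_dir altitude
  · simp only [pvModelExtension, PySem.Dict.get?_mk_cons, h1, h2, if_pos]
    exact pvBranchLem _ (Or.inr rfl) model_dir altitude
  · simp [pvModelExtension, PySem.Dict.get?, List.find?, h1, h2]
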